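-- pv_equiv track=rewrite | github.com/arose13/YorkU-PopulationGenetics | assignment_one/AssignmentOneFunctions.py | pairwise_mismatches
-- ===== SOURCE A (Python) =====
-- from itertools import combinations_with_replacement, combinations
--
-- def pairwise_mismatches(site):
--     # Segregating site pairwise mismatches
--     mismatches = 0
--     combos = 0
--
--     for pair in combinations(site, 2):
--         combos += 1
--         if pair[0] != pair[1]:
--             mismatches += 1
--
--     return mismatches, combos
-- ===== SOURCE B (Python) =====
-- def pairwise_mismatches(site):
--     # Frequency counting: combos = C(n,2); equal pairs = sum C(c,2) over allele counts.
--     counts = {}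
--     for a in site:
--         counts[a] = counts.get(a, 0) + 1
--     n = len(site)
--     combos = n * (n - 1) // 2
--     same = sum(c * (c - 1) // 2 for c in counts.values())
--     return combos - same, combos
-- ===== Notes on version B (the rewrite author's own statement) =====
-- stated objective: faster
-- what changed: Replaces the O(n^2) scan over itertools.combinations(site, 2) with a single frequency-count pass: combos = n*(n-1)//2 and mismatches = combos - sum of c*(c-1)//2 over allele counts.
import Mathlib
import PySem

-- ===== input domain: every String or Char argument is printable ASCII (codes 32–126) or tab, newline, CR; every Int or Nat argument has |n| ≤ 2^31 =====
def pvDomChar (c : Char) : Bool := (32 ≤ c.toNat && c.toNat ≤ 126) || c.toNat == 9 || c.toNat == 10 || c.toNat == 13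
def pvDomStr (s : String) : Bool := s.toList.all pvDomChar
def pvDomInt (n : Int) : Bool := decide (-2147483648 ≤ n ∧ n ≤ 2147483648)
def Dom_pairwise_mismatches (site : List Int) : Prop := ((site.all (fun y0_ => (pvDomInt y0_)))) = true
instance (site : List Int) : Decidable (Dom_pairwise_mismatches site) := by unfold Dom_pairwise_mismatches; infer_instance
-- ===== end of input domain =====

-- B replaces A's O(n^2) scan over combinations(site, 2) with one frequency-count pass
-- (combos = n(n-1)//2, mismatches = combos - sum of c(c-1)//2 over allele counts).

-- ===== PORT A =====
-- itertools.combinations(site, 2), in Python's order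
def pyCombinations2 : List Int → List (Int × Int)
  | [] => []
  | x :: xs => xs.map (fun y => (x, y)) ++ pyCombinations2 xs

def pairwise_mismatches (site : List Int) : List Int :=
  let r := (pyCombinations2 site).foldl
    (fun (s : Int × Int) (pair : Int × Int) =>
      (if pair.1 ≠ pair.2 then s.1 + 1 else s.1, s.2 + 1)) (0, 0)
  [r.1, r.2]

-- ===== PORT B =====
def pairwise_mismatches_alt (site : List Int) : List Int :=
  let counts := site.foldl (fun (d : PySem.Dict Int Int) a => d.insert a (d.getD a 0 + 1)) PySem.Dict.empty
  let n : Int := site.length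
  let combos := PySem.Int.floordiv (n * (n - 1)) 2
  let same := (counts.values.map (fun c => PySem.Int.floordiv (c * (c - 1)) 2)).sum
  [combos - same, combos]

-- ===== PRECONDITION & SPEC =====
def Spec_pairwise_mismatches (site : List Int) (out : List Int) : Prop := out = pairwise_mismatches_alt site
instance (site : List Int) (out : List Int) : Decidable (Spec_pairwise_mismatches site out) := by unfold Spec_pairwise_mismatches; infer_instance

-- ===== CLAIM (what is proved, stated in full; the proofs are below) =====
def Claim_equal_pairwise_mismatches : Prop := ∀ (site : List Int), Dom_pairwise_mismatches site → Spec_pairwise_mismatches site (pairwise_mismatches site)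

-- ===== LEMMAS AND PROOFS =====

-- C(c,2) over Nat
def gN (c : Nat) : Nat := c * (c - 1) / 2

lemma gN_succ (c : Nat) : gN (c + 1) = c + gN c := by
  cases c with
  | zero => decide
  | succ k =>
      unfold gN
      obtain ⟨d, hd⟩ := Nat.even_mul_succ_self k
      have h1 : (k + 1 + 1) * (k + 1 + 1 - 1) = d + d + 2 * (k + 1) := by
        have : (k + 1 + 1) * (k + 1) = k * (k + 1) + 2 * (k + 1) := by ring
        simpa [hd] using this
      have h2 : (k + 1) * (k + 1 - 1) = d + d := by
        simpa [Nat.mul_comm] using hd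
      rw [h1, h2]; omega

lemma gN_cast (c : Nat) :
    PySem.Int.floordiv ((c : Int) * ((c : Int) - 1)) 2 = (gN c : Int) := by
  cases c with
  | zero => decide
  | succ k =>
      have h : ((k + 1 : Nat) : Int) * (((k + 1 : Nat) : Int) - 1) = (((k + 1) * k : Nat) : Int) := by
        push_cast; ring
      have h2 : PySem.Int.floordiv ((((k + 1) * k : Nat)) : Int) 2 = (((k + 1) * k / 2 : Nat) : Int) := by
        exact_mod_cast PySem.Int.floordiv_natCast ((k + 1) * k) 2
      rw [h, h2]
      simp [gN]

lemma length_pyCombinations2 (xs : List Int) :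
    2 * (pyCombinations2 xs).length = xs.length * (xs.length - 1) := by
  induction xs with
  | nil => rfl
  | cons x xs ih =>
      have hstep : (xs.length + 1) * (xs.length + 1 - 1)
          = xs.length * (xs.length - 1) + 2 * xs.length := by
        cases xs with
        | nil => rfl
        | cons y ys => simp; ring
      simp only [pyCombinations2, List.length_append, List.length_map, List.length_cons]
      omega

lemma foldA (l : List (Int × Int)) (m c : Int) :
    l.foldl (fun (s : Int × Int) (pair : Int × Int) =>
      (if pair.1 ≠ pair.2 then s.1 + 1 else s.1, s.2 + 1)) (m, c)
    = (m + (l.countP fun p => decide (¬ p.1 = p.2)), c + l.length) := by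
  induction l generalizing m c with
  | nil => simp
  | cons p l ih =>
      simp only [List.foldl_cons, List.countP_cons, List.length_cons]
      by_cases h : p.1 = p.2
      · rw [if_neg (by simp [h]), ih]
        simp [h, Prod.ext_iff]
        omega
      · rw [if_pos h, ih]
        simp [h, Prod.ext_iff]
        omega

lemma countP_eq_map_pair (x : Int) (xs : List Int) :
    ((xs.map (fun y => (x, y))).countP fun p => decide (p.1 = p.2)) = xs.count x := by
  induction xs with
  | nil => rfl
  | cons y ys ih =>
      simp only [List.map_cons, List.countP_cons, List.count_cons, ih]
      by_cases h : x = y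
      · simp [h]
      · simp [h, Ne.symm h]

-- sum of C(count,2) over the distinct elements
def sumG (xs : List Int) : Nat :=
  ((PySem.Set.ofList xs).map (fun k => gN (xs.count k))).sum

lemma sumG_cons (x : Int) (xs : List Int) :
    sumG (x :: xs) = xs.count x + sumG xs := by
  unfold sumG
  by_cases hx : x ∈ xs
  · have hmem : ∀ a : Int, a ∈ PySem.Set.ofList (x :: xs) ↔ a ∈ PySem.Set.ofList xs := by
      intro a
      simp only [PySem.Set.mem_ofList, List.mem_cons]
      constructor
      · rintro (rfl | h) <;> [exact hx; exact h]
      · exact Or.inr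
    have hperm : (PySem.Set.ofList (x :: xs)).Perm (PySem.Set.ofList xs) :=
      (List.perm_ext_iff_of_nodup (PySem.Set.nodup_ofList _) (PySem.Set.nodup_ofList _)).2 hmem
    have hx' : x ∈ PySem.Set.ofList xs := (PySem.Set.mem_ofList _ _).2 hx
    have hp2 : (PySem.Set.ofList xs).Perm (x :: (PySem.Set.ofList xs).erase x) :=
      List.perm_cons_erase hx'
    have hne : ∀ k ∈ (PySem.Set.ofList xs).erase x, k ≠ x := by
      intro k hk
      exact (List.Nodup.mem_erase_iff (PySem.Set.nodup_ofList _) |>.1 hk).1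
    have e1 : ((PySem.Set.ofList (x :: xs)).map (fun k => gN ((x :: xs).count k))).sum
        = ((x :: (PySem.Set.ofList xs).erase x).map (fun k => gN ((x :: xs).count k))).sum :=
      ((hperm.trans hp2).map _).sum_eq
    have e2 : ((PySem.Set.ofList xs).map (fun k => gN (xs.count k))).sum
        = ((x :: (PySem.Set.ofList xs).erase x).map (fun k => gN (xs.count k))).sum :=
      (hp2.map _).sum_eq
    have e3 : ((PySem.Set.ofList xs).erase x).map (fun k => gN ((x :: xs).count k))
        = ((PySem.Set.ofList xs).erase x).map (fun k => gN (xs.count k)) := by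
      apply List.map_congr_left
      intro k hk
      simp [Ne.symm (hne k hk)]
    rw [e1, e2]
    simp only [List.map_cons, List.sum_cons, e3, List.count_cons_self, gN_succ]
    omega
  · have hnm : x ∉ PySem.Set.ofList xs := fun h => hx ((PySem.Set.mem_ofList _ _).1 h)
    have hperm : (PySem.Set.ofList (x :: xs)).Perm (x :: PySem.Set.ofList xs) := by
      apply (List.perm_ext_iff_of_nodup (PySem.Set.nodup_ofList _) _).2
      · intro a
        simp [PySem.Set.mem_ofList, List.mem_cons]
      · exact List.nodup_cons.2 ⟨hnm, PySem.Set.nodup_ofList _⟩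
    have e1 := (hperm.map (fun k => gN ((x :: xs).count k))).sum_eq
    have e3 : (PySem.Set.ofList xs).map (fun k => gN ((x :: xs).count k))
        = (PySem.Set.ofList xs).map (fun k => gN (xs.count k)) := by
      apply List.map_congr_left
      intro k hk
      have hkx : k ≠ x := by rintro rfl; exact hnm hk
      simp [Ne.symm hkx]
    have hc : xs.count x = 0 := List.count_eq_zero.2 hx
    rw [e1]
    simp only [List.map_cons, List.sum_cons, e3, List.count_cons_self, hc]
    simp [gN]

lemma countP_eq_pyCombinations2 (xs : List Int) :
    ((pyCombinations2 xs).countP fun p => decide (p.1 = p.2)) = sumG xs := by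
  induction xs with
  | nil => rfl
  | cons x xs ih =>
      simp only [pyCombinations2, List.countP_append, countP_eq_map_pair, ih, sumG_cons]

lemma countP_split (l : List (Int × Int)) :
    (l.countP fun p => decide (¬ p.1 = p.2)) + (l.countP fun p => decide (p.1 = p.2)) = l.length := by
  induction l with
  | nil => rfl
  | cons p l ih =>
      simp only [List.countP_cons, List.length_cons]
      by_cases h : p.1 = p.2 <;> simp [h, decide_not] at ih ⊢ <;> omega

-- ===== VERDICT (by name: the statement is the Claim_ definition above) =====
theorem pairwise_mismatches_spec : Claim_equal_pairwise_mismatches := by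
  intro site _
  unfold Spec_pairwise_mismatches pairwise_mismatches pairwise_mismatches_alt
  rw [PySem.Dict.foldl_insert_getD_add_one_eq_counter]
  have hvals : (PySem.Dict.counter site).values
      = (PySem.Set.ofList site).map (fun k => ((site.count k : Nat) : Int)) := by
    show ((PySem.Dict.counter site).items.map (·.2)) = _
    rw [PySem.Dict.items_counter]
    simp [List.map_map, Function.comp]
  rw [foldA]
  simp only [hvals, List.map_map, Function.comp_def, gN_cast]
  have hsum : ((PySem.Set.ofList site).map (fun k => ((gN (site.count k) : Nat) : Int))).sum
      = ((sumG site : Nat) : Int) := by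
    unfold sumG
    rw [show (fun k : Int => ((gN (site.count k) : Nat) : Int))
          = (fun n : Nat => (n : Int)) ∘ (fun k => gN (site.count k)) from rfl,
        ← List.map_map]
    exact (Nat.cast_list_sum _).symm
  rw [hsum]
  have hcnt := countP_eq_pyCombinations2 site
  have hsplit := countP_split (pyCombinations2 site)
  have hg : gN site.length = (pyCombinations2 site).length := by
    have hlen := length_pyCombinations2 site
    obtain ⟨P, hP⟩ : ∃ P, site.length * (site.length - 1) = P := ⟨_, rfl⟩
    unfold gN
    rw [hP] at hlen ⊢
    omega
  simp only [List.cons.injEq, and_true]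
  omega
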